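-- pv_equiv track=rewrite | github.com/ramya-diggibyte/python_assignment | src/piling_up/util.py | piling_up
-- ===== SOURCE A (Python) =====
-- def piling_up(t, tests):
--     results = []
--     for test in tests:
--         n = len(test)
--         b = []
--         while len(test) > 0:
--             if test[-1] > test[0]:
--                 b.append(test.pop(-1))
--             else:
--                 b.append(test.pop(0))
--         c = b.copy()
--         b.sort(reverse=True)
--         if b == c:
--             results.append('Yes')
--         else:
--             results.append('No')
--     return ' '.join(results)
-- ===== SOURCE B (Python) =====
-- def piling_up(t, tests):
--     # Two-pointer greedy: O(n) per test, no list mutation, no sort.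
--     results = []
--     for test in tests:
--         i, j = 0, len(test) - 1
--         prev = None
--         ok = True
--         while i <= j:
--             if test[j] > test[i]:
--                 x = test[j]
--                 j -= 1
--             else:
--                 x = test[i]
--                 i += 1
--             if prev is not None and x > prev:
--                 ok = False
--                 break
--             prev = x
--         results.append('Yes' if ok else 'No')
--     return ' '.join(results)
-- ===== Notes on version B (the rewrite author's own statement) =====
-- stated objective: faster
-- what changed: Replaces A's destructive pop(0)/pop(-1) loop that builds list b and then sorts it for a descending check with a two-pointer scan that tracks the last placed value and checks non-increasing inline (no mutation, no list building, no sort).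
import Mathlib
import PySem

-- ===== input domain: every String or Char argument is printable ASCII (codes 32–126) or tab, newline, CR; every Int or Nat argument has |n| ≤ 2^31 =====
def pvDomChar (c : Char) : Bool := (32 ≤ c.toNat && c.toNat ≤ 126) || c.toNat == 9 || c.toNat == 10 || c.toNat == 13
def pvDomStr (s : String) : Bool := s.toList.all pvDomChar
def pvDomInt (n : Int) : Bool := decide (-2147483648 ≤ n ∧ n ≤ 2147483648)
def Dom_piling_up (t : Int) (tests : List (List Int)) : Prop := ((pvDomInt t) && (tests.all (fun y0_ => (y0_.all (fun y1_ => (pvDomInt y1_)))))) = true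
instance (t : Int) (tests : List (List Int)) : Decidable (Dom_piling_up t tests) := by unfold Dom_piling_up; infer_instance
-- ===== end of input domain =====

-- B replaces A's destructive pop-and-sort check by an O(n) two-pointer scan with an inline
-- non-increasing check; equivalence is about the RETURN value only (Python A empties each
-- inner list of `tests` in place, B does not mutate).

-- ===== PORT A =====
-- while len(test) > 0: pop the larger end into b (front on ties); test[-1]/test[0] are exact
-- here via getLast!/head! since the loop body runs only when the list is nonempty.
def pileA (test b : List Int) : List Int :=
  if test.length > 0 then
    if test.getLast! > test.head! then
      pileA test.dropLast (b ++ [test.getLast!])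
    else
      pileA test.tail (b ++ [test.head!])
  else b
termination_by test.length
decreasing_by
  · simpa using Nat.pred_lt (by omega)
  · simpa using Nat.pred_lt (by omega)

def piling_up (t : Int) (tests : List (List Int)) : String :=
  let results := tests.foldl (fun results test =>
    let b := pileA test []
    let c := b                                       -- c = b.copy()
    let b := PySem.List.sorted b (fun x => x) true   -- b.sort(reverse=True)
    if b == c then results ++ ["Yes"] else results ++ ["No"]) []
  PySem.Str.join " " results

-- ===== PORT B =====
-- two pointers i, j; prev = last placed value; all accesses happen with 0 ≤ i ≤ j < len,
-- so `(pyGet? …).getD 0` is exact (the default is never taken).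
def pileB (test : List Int) (i j : Int) (prev : Option Int) : Bool :=
  if i ≤ j then
    if (PySem.List.pyGet? test j).getD 0 > (PySem.List.pyGet? test i).getD 0 then
      let x := (PySem.List.pyGet? test j).getD 0
      if prev.any (fun p => x > p) then false else pileB test i (j - 1) (some x)
    else
      let x := (PySem.List.pyGet? test i).getD 0
      if prev.any (fun p => x > p) then false else pileB test (i + 1) j (some x)
  else true
termination_by (j + 1 - i).toNat
decreasing_by
  · omega
  · omega

def piling_up_alt (t : Int) (tests : List (List Int)) : String :=
  let results := tests.foldl (fun results test =>
    results ++ [if pileB test 0 ((test.length : Int) - 1) none then "Yes" else "No"]) []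
  PySem.Str.join " " results

-- ===== PRECONDITION & SPEC =====
def Spec_piling_up (t : Int) (tests : List (List Int)) (out : String) : Prop := out = piling_up_alt t tests
instance (t : Int) (tests : List (List Int)) (out : String) : Decidable (Spec_piling_up t tests out) := by unfold Spec_piling_up; infer_instance

-- ===== CLAIM (what is proved, stated in full; the proofs are below) =====
def Claim_equal_piling_up : Prop := ∀ (t : Int) (tests : List (List Int)), Dom_piling_up t tests → Spec_piling_up t tests (piling_up t tests)

-- ===== LEMMAS AND PROOFS =====

-- the sequence of values A's while-loop pops (A's b, without the accumulator)
def picked (test : List Int) : List Int :=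
  if test.length > 0 then
    if test.getLast! > test.head! then test.getLast! :: picked test.dropLast
    else test.head! :: picked test.tail
  else []
termination_by test.length
decreasing_by
  · simpa using Nat.pred_lt (by omega)
  · simpa using Nat.pred_lt (by omega)

-- inline non-increasing check, the shape shared by B's loop
def noninc (prev : Option Int) (l : List Int) : Bool :=
  match l with
  | [] => true
  | x :: xs => if prev.any (fun p => x > p) then false else noninc (some x) xs

theorem pileA_eq (test b : List Int) : pileA test b = b ++ picked test := by
  induction test, b using pileA.induct with
  | case1 test b ht hcmp ih =>
      rw [pileA, picked, if_pos ht, if_pos ht, if_pos hcmp, if_pos hcmp, ih,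
        List.append_assoc]
      rfl
  | case2 test b ht hcmp ih =>
      rw [pileA, picked, if_pos ht, if_pos ht, if_neg hcmp, if_neg hcmp, ih,
        List.append_assoc]
      rfl
  | case3 test b ht => rw [pileA, picked, if_neg ht, if_neg ht]; simp

theorem noninc_iff (prev : Option Int) (l : List Int) :
    noninc prev l = true ↔ List.IsChain (fun a b : Int => b ≤ a) (prev.toList ++ l) := by
  induction l generalizing prev with
  | nil => cases prev <;> simp [noninc]
  | cons x xs ih =>
      cases prev with
      | none => simpa [noninc] using ih (some x)
      | some p =>
          by_cases h : x > p
          · simp only [noninc, Option.any_some]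
            rw [if_pos (by simpa using h)]
            simp only [Bool.false_eq_true, false_iff, Option.toList_some, List.cons_append,
              List.nil_append, List.isChain_cons_cons]
            rintro ⟨h1, -⟩
            omega
          · have hle : (x : Int) ≤ p := by omega
            simp only [noninc, Option.any_some]
            rw [if_neg (by simpa using h), ih (some x)]
            simp only [Option.toList_some, List.cons_append, List.nil_append,
              List.isChain_cons_cons]
            constructor
            · intro hc
              exact ⟨hle, hc⟩
            · rintro ⟨-, hc⟩
              exact hc

-- A's sorted-descending comparison is exactly the non-increasing property of b
theorem sorted_rev_eq_iff (l : List Int) :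
    (PySem.List.sorted l (fun x => x) true = l) ↔ noninc none l = true := by
  rw [noninc_iff]
  simp only [Option.toList_none, List.nil_append]
  have hiff := @List.isChain_iff_pairwise Int (fun a b : Int => b ≤ a) l
    ⟨fun h1 h2 => le_trans h2 h1⟩
  rw [hiff]
  constructor
  · intro h
    have := PySem.List.sorted_pairwise_rev (xs := l) (key := fun x : Int => x)
    rwa [h] at this
  · intro h
    exact PySem.List.sorted_rev_eq_self_of_pairwise l (fun x => x) h

theorem getLast!_cons (a : Int) (l : List Int) :
    (a :: l).getLast! = (a :: l).getLast (by simp) := rfl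

theorem pyGetD_pos (l : List Int) (j : Int) (h0 : 0 ≤ j) (h : j.toNat < l.length) :
    (PySem.List.pyGet? l j).getD 0 = l[j.toNat] := by
  rcases Int.eq_ofNat_of_zero_le h0 with ⟨n, rfl⟩
  simp only [Int.toNat_natCast] at h ⊢
  rw [PySem.List.pyGet?_natCast, List.getElem?_eq_getElem h]
  rfl

theorem dropLast_take_le {l : List Int} {m : Nat} (h : m ≤ l.length) :
    (l.take m).dropLast = l.take (m - 1) := by
  rcases Nat.lt_or_ge m l.length with hlt | hge
  · exact List.dropLast_take hlt
  · have : m = l.length := by omega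
    subst this
    rw [List.take_of_length_le (le_refl _), List.dropLast_eq_take]

-- B's loop is the inline non-increasing check of the picked sequence of the segment test[i..j]
theorem getLast!_eq_getElem (l : List Int) (h : 0 < l.length) : l.getLast! = l[l.length - 1] := by
  cases l with
  | nil => simp at h
  | cons a t => rw [getLast!_cons, List.getLast_eq_getElem]

theorem pileB_eq_noninc (m : Nat) (test : List Int) (i j : Int) (prev : Option Int)
    (hm : (j + 1 - i).toNat = m) (hi : 0 ≤ i) (hj : j < (test.length : Int)) :
    pileB test i j prev = noninc prev (picked ((test.drop i.toNat).take (j + 1 - i).toNat)) := by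
  induction m using Nat.strong_induction_on generalizing test i j prev with
  | _ m IH =>
  rw [pileB]
  by_cases hij : i ≤ j
  · have hiN : i.toNat < test.length := by omega
    have hjN : j.toNat < test.length := by omega
    generalize hk : (j + 1 - i).toNat = k
    have hk1 : 1 ≤ k := by omega
    have hlen : k ≤ (test.drop i.toNat).length := by rw [List.length_drop]; omega
    have hseg_len : ((test.drop i.toNat).take k).length = k := by
      rw [List.length_take]; omega
    have hseg_cons : (test.drop i.toNat).take k
        = test[i.toNat] :: ((test.drop (i.toNat + 1)).take (k - 1)) := by
      have hk' : k = (k - 1) + 1 := by omega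
      rw [hk', List.drop_eq_getElem_cons hiN, List.take_succ_cons]
      simp
    have hhead : ((test.drop i.toNat).take k).head! = test[i.toNat] := by
      rw [hseg_cons]; rfl
    have hlast : ((test.drop i.toNat).take k).getLast! = test[j.toNat] := by
      rw [getLast!_eq_getElem _ (by rw [hseg_len]; omega)]
      simp only [hseg_len]
      rw [List.getElem_take, List.getElem_drop]
      congr 1
      omega
    have hGi : (PySem.List.pyGet? test i).getD 0 = test[i.toNat] := pyGetD_pos test i hi hiN
    have hGj : (PySem.List.pyGet? test j).getD 0 = test[j.toNat] :=
      pyGetD_pos test j (by omega) hjN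
    rw [if_pos hij, hGi, hGj]
    rw [picked,
      if_pos (show ((test.drop i.toNat).take k).length > 0 from by rw [hseg_len]; omega),
      hhead, hlast]
    by_cases hcmp : test[j.toNat] > test[i.toNat]
    · rw [if_pos hcmp, if_pos hcmp]
      simp only [noninc]
      by_cases hbad : Option.any (fun p => decide (test[j.toNat] > p)) prev = true
      · rw [if_pos hbad, if_pos hbad]
      · rw [if_neg hbad, if_neg hbad]
        -- recursive call: j becomes j - 1; the segment loses its last element
        have hdl : ((test.drop i.toNat).take k).dropLast
            = (test.drop i.toNat).take ((j - 1) + 1 - i).toNat := by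
          rw [dropLast_take_le hlen]
          congr 1
          omega
        rw [hdl]
        exact IH ((j - 1) + 1 - i).toNat (by omega) test i (j - 1) _ rfl hi (by omega)
    · rw [if_neg hcmp, if_neg hcmp]
      simp only [noninc]
      by_cases hbad : Option.any (fun p => decide (test[i.toNat] > p)) prev = true
      · rw [if_pos hbad, if_pos hbad]
      · rw [if_neg hbad, if_neg hbad]
        -- recursive call: i becomes i + 1; the segment loses its head
        have htl : ((test.drop i.toNat).take k).tail
            = (test.drop (i + 1).toNat).take (j + 1 - (i + 1)).toNat := by
          rw [hseg_cons, List.tail_cons]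
          congr 1
          · omega
          · congr 1
            omega
        rw [htl]
        exact IH (j + 1 - (i + 1)).toNat (by omega) test (i + 1) j _ rfl (by omega) hj
  · rw [if_neg hij]
    have h0 : (j + 1 - i).toNat = 0 := by omega
    rw [h0]
    simp [picked, noninc]

theorem per_test (test : List Int) :
    (if PySem.List.sorted (pileA test []) (fun x => x) true == pileA test [] then ("Yes" : String) else "No")
      = (if pileB test 0 ((test.length : Int) - 1) none then ("Yes" : String) else "No") := by
  have hA : pileA test [] = picked test := by simpa using pileA_eq test []
  have hB : pileB test 0 ((test.length : Int) - 1) none = noninc none (picked test) := by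
    rcases test with _ | ⟨a, l⟩
    · rw [pileB]; simp [picked, noninc]
    · rw [pileB_eq_noninc ((((a :: l).length : Int) - 1 + 1 - 0).toNat) (a :: l) 0
        (((a :: l).length : Int) - 1) none rfl (by omega) (by simp)]
      congr 2
      have h1 : (((a :: l).length : Int) - 1 + 1 - 0).toNat = (a :: l).length := by omega
      rw [h1]
      simp
  rw [hA, hB]
  by_cases h : noninc none (picked test) = true
  · rw [if_pos (by simp [(sorted_rev_eq_iff (picked test)).mpr h]), if_pos h]
  · rw [if_neg (by simpa using fun he => h ((sorted_rev_eq_iff (picked test)).mp he)),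
      if_neg (by simpa using h)]

theorem results_eq (tests : List (List Int)) (acc : List String) :
    tests.foldl (fun results test =>
      let b := pileA test []
      let c := b
      let b := PySem.List.sorted b (fun x => x) true
      if b == c then results ++ ["Yes"] else results ++ ["No"]) acc
    = tests.foldl (fun results test =>
      results ++ [if pileB test 0 ((test.length : Int) - 1) none then "Yes" else "No"]) acc := by
  have hf : (fun (results : List String) (test : List Int) =>
      let b := pileA test []
      let c := b
      let b := PySem.List.sorted b (fun x => x) true
      if b == c then results ++ ["Yes"] else results ++ ["No"])
      = (fun (results : List String) (test : List Int) =>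
        results ++ [if pileB test 0 ((test.length : Int) - 1) none then "Yes" else "No"]) := by
    funext results test
    have h := per_test test
    by_cases hc : PySem.List.sorted (pileA test []) (fun x => x) true == pileA test []
    · by_cases hb : pileB test 0 ((test.length : Int) - 1) none
      · simp [hc, hb]
      · rw [if_pos hc, if_neg (by simpa using hb)] at h
        exact absurd h (by decide)
    · by_cases hb : pileB test 0 ((test.length : Int) - 1) none
      · rw [if_neg (by simpa using hc), if_pos (by simpa using hb)] at h
        exact absurd h (by decide)
      · simp [hb, hc]
  rw [hf]

-- ===== VERDICT (by name: the statement is the Claim_ definition above) =====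
theorem piling_up_spec : Claim_equal_piling_up := by
  intro t tests _
  show piling_up t tests = piling_up_alt t tests
  unfold piling_up piling_up_alt
  rw [results_eq]
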